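-- pv_equiv track=rewrite | github.com/mrrCarter/sentinelayer-v1-action | src/omargate/analyze/orchestrator.py | _flatten_hotspots
-- ===== SOURCE A (Python) =====
-- from typing import List, Optional
--
-- def _flatten_hotspots(hotspots: dict) -> List[str]:
--     files: List[str] = []
--     seen = set()
--     for group in hotspots.values():
--         if not isinstance(group, list):
--             continue
--         for rel_path in group:
--             if not rel_path or rel_path in seen:
--                 continue
--             seen.add(rel_path)
--             files.append(rel_path)
--     return files
-- ===== SOURCE B (Python) =====
-- from typing import List
--
--
-- def _dedup(xs: List[str]) -> List[str]:
--     # iterative sieve: take the head, strip its later copies, repeat on the rest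
--     out: List[str] = []
--     while xs:
--         head = xs[0]
--         out.append(head)
--         xs = [x for x in xs[1:] if x != head]
--     return out
--
--
-- def _flatten_hotspots(hotspots: dict) -> List[str]:
--     flat = [p for group in hotspots.values() if isinstance(group, list)
--             for p in group if p]
--     return _dedup(flat)
-- ===== Notes on version B (the rewrite author's own statement) =====
-- stated objective: alternative
-- what changed: Replaces A's single interleaved pass maintaining a seen-set with a flat candidate comprehension followed by an iterative sieve dedup that repeatedly takes the head and strips its later copies from the rest (no seen structure at all).
import Mathlib
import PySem

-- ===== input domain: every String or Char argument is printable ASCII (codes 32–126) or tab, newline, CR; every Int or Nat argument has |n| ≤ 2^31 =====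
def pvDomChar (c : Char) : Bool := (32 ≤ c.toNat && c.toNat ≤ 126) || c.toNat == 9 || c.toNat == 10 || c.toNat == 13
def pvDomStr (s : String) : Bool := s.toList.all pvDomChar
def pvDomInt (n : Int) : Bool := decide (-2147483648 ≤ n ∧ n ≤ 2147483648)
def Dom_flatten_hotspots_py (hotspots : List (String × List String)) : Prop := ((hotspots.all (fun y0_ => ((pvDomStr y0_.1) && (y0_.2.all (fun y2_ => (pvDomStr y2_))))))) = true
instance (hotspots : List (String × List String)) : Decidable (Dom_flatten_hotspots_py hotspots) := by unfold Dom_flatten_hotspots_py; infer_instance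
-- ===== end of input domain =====

-- B replaces A's interleaved seen-set pass by flattening into a candidate list and a recursive sieve dedup (alternative decomposition; same results).


-- ===== PORT A =====
-- state = (files, seen); the isinstance(group, list) guard is vacuous here: the type fixes every value to a list
def flatten_hotspots_py (hotspots : List (String × List String)) : List String :=
  (hotspots.foldl
    (fun (st : List String × PySem.Set String) kv =>
      kv.2.foldl
        (fun st p =>
          if (p == "") || PySem.Set.contains st.2 p then st
          else (st.1 ++ [p], PySem.Set.add st.2 p))
        st)
    ([], PySem.Set.empty)).1

-- ===== PORT B =====
-- _dedup's while loop: state = (xs, out); take the head, append it to out, strip its later copies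
def pyDedupLoop (xs : List String) (out : List String) : List String :=
  match xs with
  | [] => out
  | x :: rest => pyDedupLoop (rest.filter (fun y => !(y == x))) (out ++ [x])
termination_by xs.length
decreasing_by
  simp only [List.length_unattach, List.length_cons, Nat.lt_succ_iff]
  exact (List.length_filter_le _ _).trans (le_of_eq List.length_attach)

-- flat = [p for group in hotspots.values() for p in group if p]; return _dedup(flat)
def flatten_hotspots_py_alt (hotspots : List (String × List String)) : List String :=
  pyDedupLoop (hotspots.flatMap (fun kv => kv.2.filter (fun p => !(p == "")))) []

-- ===== PRECONDITION & SPEC =====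
def Spec_flatten_hotspots_py (hotspots : List (String × List String)) (out : List String) : Prop := out = flatten_hotspots_py_alt hotspots
instance (hotspots : List (String × List String)) (out : List String) : Decidable (Spec_flatten_hotspots_py hotspots out) := by unfold Spec_flatten_hotspots_py; infer_instance

-- ===== CLAIM (what is proved, stated in full; the proofs are below) =====
def Claim_equal_flatten_hotspots_py : Prop := ∀ (hotspots : List (String × List String)), Dom_flatten_hotspots_py hotspots → Spec_flatten_hotspots_py hotspots (flatten_hotspots_py hotspots)

-- ===== LEMMAS AND PROOFS =====

-- Inner loop of A, started on a duplicated state (s, s), keeps the two components equal and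
-- acts as folding Set.add over the truthy elements of the group.
lemma inner_dup (g : List String) (s : PySem.Set String) :
    g.foldl
      (fun (st : List String × PySem.Set String) p =>
        if (p == "") || PySem.Set.contains st.2 p then st
        else (st.1 ++ [p], PySem.Set.add st.2 p))
      (s, s)
    = (((g.filter (fun p => !(p == ""))).foldl PySem.Set.add s),
       ((g.filter (fun p => !(p == ""))).foldl PySem.Set.add s)) := by
  induction g generalizing s with
  | nil => rfl
  | cons p g ih =>
    simp only [List.foldl_cons, List.filter_cons]
    by_cases hp : p = ""
    · rw [if_pos (show (p == "" || PySem.Set.contains s p) = true by simp [hp]),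
          if_neg (show ¬ ((!(p == "")) = true) by simp [hp])]
      exact ih s
    · rw [if_pos (show ((!(p == "")) = true) by simp [hp]), List.foldl_cons]
      by_cases hc : p ∈ s
      · have hadd : PySem.Set.add s p = s := by simp [PySem.Set.add, hc]
        rw [if_pos (show (p == "" || PySem.Set.contains s p) = true by simp [hc]), hadd]
        exact ih s
      · rw [if_neg (show ¬ ((p == "" || PySem.Set.contains s p) = true) by simp [hp, hc])]
        have hadd : PySem.Set.add s p = s ++ [p] := by simp [PySem.Set.add, hc]
        rw [← hadd]
        exact ih (PySem.Set.add s p)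

-- Outer loop of A equals folding Set.add over the concatenation of all filtered groups.
lemma outer_dup (hs : List (String × List String)) (s : PySem.Set String) :
    hs.foldl
      (fun (st : List String × PySem.Set String) kv =>
        kv.2.foldl
          (fun st p =>
            if (p == "") || PySem.Set.contains st.2 p then st
            else (st.1 ++ [p], PySem.Set.add st.2 p))
          st)
      (s, s)
    = (((hs.flatMap (fun kv => kv.2.filter (fun p => !(p == "")))).foldl PySem.Set.add s),
       ((hs.flatMap (fun kv => kv.2.filter (fun p => !(p == "")))).foldl PySem.Set.add s)) := by
  induction hs generalizing s with
  | nil => rfl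
  | cons kv hs ih =>
    simp only [List.foldl_cons, List.flatMap_cons, List.foldl_append]
    rw [inner_dup, ih]

-- Cons-shaped restatement of the sieve loop (for the induction below).
def pyDedupSieve : List String → List String
  | [] => []
  | x :: rest => x :: pyDedupSieve (rest.filter (fun y => !(y == x)))
termination_by xs => xs.length
decreasing_by
  simp only [List.length_unattach, List.length_cons, Nat.lt_succ_iff]
  exact (List.length_filter_le _ _).trans (le_of_eq List.length_attach)

-- The accumulator loop is the cons-shaped sieve appended to the accumulator.
lemma pyDedupLoop_eq (xs out : List String) :
    pyDedupLoop xs out = out ++ pyDedupSieve xs := by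
  induction hn : xs.length using Nat.strong_induction_on generalizing xs out with
  | _ n ih =>
    match xs with
    | [] => simp [pyDedupLoop, pyDedupSieve]
    | x :: rest =>
      rw [pyDedupLoop, pyDedupSieve,
          ih (rest.filter (fun y => !(y == x))).length
            (by simpa [← hn] using Nat.lt_succ_of_le (List.length_filter_le _ rest))
            _ _ rfl]
      simp

-- Folding Set.add from a seed s equals s followed by the sieve dedup of the not-yet-seen elements.
lemma foldl_add_eq_sieve (xs : List String) (s : PySem.Set String) :
    xs.foldl PySem.Set.add s = s ++ pyDedupSieve (xs.filter (fun y => !(decide (y ∈ s)))) := by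
  induction xs generalizing s with
  | nil => simp [pyDedupSieve]
  | cons x xs ih =>
    simp only [List.foldl_cons, List.filter_cons]
    by_cases hx : x ∈ s
    · have hadd : PySem.Set.add s x = s := by simp [PySem.Set.add, hx]
      rw [hadd, if_neg (by simp [hx]), ih]
    · have hadd : PySem.Set.add s x = s ++ [x] := by simp [PySem.Set.add, hx]
      rw [if_pos (by simp [hx]), hadd, ih]
      have hfilt : (xs.filter (fun y => !(decide (y ∈ s ++ [x]))))
          = (xs.filter (fun y => !(decide (y ∈ s)))).filter (fun y => !(y == x)) := by
        rw [List.filter_filter]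
        apply List.filter_congr
        intro a _
        by_cases hax : a = x <;> simp [hax, hx]
      rw [hfilt, pyDedupSieve, List.append_assoc, List.singleton_append]

-- ===== VERDICT (by name: the statement is the Claim_ definition above) =====
theorem flatten_hotspots_py_spec : Claim_equal_flatten_hotspots_py := by
  intro hs _
  unfold Spec_flatten_hotspots_py flatten_hotspots_py flatten_hotspots_py_alt
  rw [show (PySem.Set.empty : PySem.Set String) = [] from rfl, outer_dup]
  rw [foldl_add_eq_sieve, pyDedupLoop_eq]
  simp
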